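-- pv_equiv track=rewrite | github.com/Prashant-Aswal/Numbers_and_Bases | ChkSub.py | chksub
-- ===== SOURCE A (Python) =====
-- def chksub(num,base):
--     i = 0
--     snum = str(num)
--     try:
--         base = int(base)
--     except:
--         return 'Invalid base value'
--     if base == 1:
--         return 'Invalid base value'
--     else:
--         for n in snum:
--             try:
--                 temp = int(n)
--             except:
--                 return 'Invalid number'
--             if int(snum[i]) >= base:
--                 return 'Invalid number'
--             else:
--                 i = i + 1
--         return 'Valid'
-- ===== SOURCE B (Python) =====
-- def chksub(num, base):
--     try:
--         base = int(base)
--     except Exception: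
--         return 'Invalid base value'
--     if base == 1:
--         return 'Invalid base value'
--     try:
--         top = max(int(c) for c in str(num))
--     except ValueError:
--         return 'Invalid number'
--     return 'Invalid number' if top >= base else 'Valid'
-- ===== Notes on version B (the rewrite author's own statement) =====
-- stated objective: simpler
-- what changed: Replaces the per-digit threshold loop with index bookkeeping and early exit by a single aggregation: parse all digits, take the maximum, and compare it once against the base.
import Mathlib
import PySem

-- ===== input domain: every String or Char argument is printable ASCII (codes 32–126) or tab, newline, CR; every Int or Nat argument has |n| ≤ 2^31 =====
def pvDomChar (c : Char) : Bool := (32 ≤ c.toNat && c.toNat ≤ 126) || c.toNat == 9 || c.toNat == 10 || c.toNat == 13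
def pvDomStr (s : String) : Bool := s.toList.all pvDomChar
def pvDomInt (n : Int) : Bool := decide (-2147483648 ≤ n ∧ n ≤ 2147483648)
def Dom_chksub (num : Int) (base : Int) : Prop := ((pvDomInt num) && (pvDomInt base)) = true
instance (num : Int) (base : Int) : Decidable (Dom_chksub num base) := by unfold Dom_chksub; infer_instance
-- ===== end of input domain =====

-- B replaces A's per-digit threshold loop (with index bookkeeping and early exit)
-- by a single aggregation: parse all digit characters, take the maximum, compare once.


-- ===== PORT A =====
-- A's for-loop over the characters of str(num), keeping the running index i
-- and re-indexing snum[i]; early return on a non-digit char or a digit ≥ base.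
def chksubGo (full : List Char) (base : Int) : List Char → Int → String
  | [], _ => "Valid"
  | n :: rest, i =>
    match PySem.Int.ofChars? [n] with            -- temp = int(n)
    | none => "Invalid number"
    | some _ =>
      match PySem.List.pyGet? full i with        -- snum[i] (never out of range here)
      | none => "Invalid number"                 -- unreachable: i stays in range
      | some c =>
        match PySem.Int.ofChars? [c] with        -- int(snum[i])
        | none => "Invalid number"               -- unreachable: same char as n
        | some v =>
          if v ≥ base then "Invalid number" else chksubGo full base rest (i + 1)

def chksub (num : Int) (base : Int) : String :=
  -- base is already an int: `base = int(base)` never raises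
  if base = 1 then "Invalid base value"
  else
    let snum := PySem.Int.toChars num
    chksubGo snum base snum 0

-- ===== PORT B =====
def chksub_alt (num : Int) (base : Int) : String :=
  if base = 1 then "Invalid base value"
  else
    -- max(int(c) for c in str(num)): first failing int(c) raises (→ none),
    -- and max of no elements raises too (caught, → "Invalid number")
    match (PySem.Int.toChars num).mapM (fun c => PySem.Int.ofChars? [c]) with
    | none => "Invalid number"
    | some [] => "Invalid number"
    | some (d :: ds) =>
        if ds.foldl max d ≥ base then "Invalid number" else "Valid"

-- ===== PRECONDITION & SPEC =====
def Spec_chksub (num : Int) (base : Int) (out : String) : Prop := out = chksub_alt num base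
instance (num : Int) (base : Int) (out : String) : Decidable (Spec_chksub num base out) := by unfold Spec_chksub; infer_instance

-- ===== CLAIM (what is proved, stated in full; the proofs are below) =====
def Claim_equal_chksub : Prop := ∀ (num : Int) (base : Int), Dom_chksub num base → Spec_chksub num base (chksub num base)

-- ===== LEMMAS AND PROOFS =====

-- A characterisation of the loop's suffix result, used on both sides.
def resB (base : Int) (suffix : List Char) : String :=
  match suffix.mapM (fun c => PySem.Int.ofChars? [c]) with
  | none => "Invalid number"
  | some ds => if ds.any (fun d => decide (base ≤ d)) then "Invalid number" else "Valid"

theorem chksubGo_eq_resB (base : Int) (suffix : List Char) :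
    ∀ (full : List Char) (k : Nat), full.drop k = suffix →
      chksubGo full base suffix (k : Int) = resB base suffix := by
  induction suffix with
  | nil => intro full k _; simp [chksubGo, resB]
  | cons n rest ih =>
    intro full k hdrop
    have hk : k < full.length := by
      by_contra h
      rw [List.drop_eq_nil_of_le (by omega)] at hdrop
      exact (List.cons_ne_nil _ _) hdrop.symm
    have hget : PySem.List.pyGet? full (k : Int) = some full[k] := by simp [hk]
    have hfk : full[k] = n := by
      have h0 := List.getElem?_drop (xs := full) (i := k) (j := 0)
      simp [hdrop] at h0
      simpa [List.getElem?_eq_getElem hk] using h0.symm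
    have hdrop' : full.drop (k + 1) = rest := by
      have : full.drop (k + 1) = (full.drop k).tail := by
        rw [List.tail_drop]
      rw [this, hdrop]; rfl
    simp only [chksubGo]
    cases hp : PySem.Int.ofChars? [n] with
    | none => simp [resB, List.mapM_cons, hp]
    | some v =>
      simp only [hget, hfk, hp]
      by_cases hv : v ≥ base
      · simp only [hv, if_pos]
        simp only [resB, List.mapM_cons, hp]
        cases hr : rest.mapM (fun c => PySem.Int.ofChars? [c]) with
        | none => simp
        | some ds => simp [List.any_cons, hv]
      · simp only [hv, if_neg, not_false_iff]
        have hrec : chksubGo full base rest ((k : Int) + 1) = resB base rest := by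
          have := ih full (k + 1) hdrop'
          simpa [Int.natCast_add] using this
        rw [hrec]
        simp only [resB, List.mapM_cons, hp]
        cases hr : rest.mapM (fun c => PySem.Int.ofChars? [c]) with
        | none => simp
        | some ds => simp [List.any_cons, show ¬ base ≤ v from hv]

-- foldl max computes "some element is ≥ base" for the nonempty list d :: ds
theorem foldl_max_ge_iff (base : Int) (ds : List Int) :
    ∀ d : Int, (ds.foldl max d ≥ base) ↔ (base ≤ d ∨ ∃ x ∈ ds, base ≤ x) := by
  induction ds with
  | nil => intro d; simp
  | cons y ys ih =>
    intro d
    rw [List.foldl_cons, ih (max d y)]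
    constructor
    · rintro (h | h)
      · rcases le_max_iff.mp h with h' | h'
        · exact Or.inl h'
        · exact Or.inr ⟨y, by simp, h'⟩
      · rcases h with ⟨x, hx, hbx⟩
        exact Or.inr ⟨x, by simp [hx], hbx⟩
    · rintro (h | ⟨x, hx, hbx⟩)
      · exact Or.inl (le_max_iff.mpr (Or.inl h))
      · rcases List.mem_cons.mp hx with rfl | hx'
        · exact Or.inl (le_max_iff.mpr (Or.inr hbx))
        · exact Or.inr ⟨x, hx', hbx⟩

theorem tdc_ne_nil (b : Nat) : ∀ (f m : Nat) (acc : List Char), acc ≠ [] → Nat.toDigitsCore b f m acc ≠ [] := by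
  intro f
  induction f with
  | zero => intro m acc h; simpa [Nat.toDigitsCore] using h
  | succ f ih =>
    intro m acc h
    simp only [Nat.toDigitsCore]
    split
    · simp
    · exact ih _ _ (by simp)

theorem toChars_ne_nil (n : Int) : PySem.Int.toChars n ≠ [] := by
  unfold PySem.Int.toChars
  split <;> simp_all
  simp only [Nat.toDigits, Nat.toDigitsCore]
  split
  · simp
  · exact tdc_ne_nil 10 _ _ _ (by simp)

-- ===== VERDICT (by name: the statement is the Claim_ definition above) =====
theorem chksub_spec : Claim_equal_chksub := by
  unfold Claim_equal_chksub
  intro num base _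
  unfold Spec_chksub chksub chksub_alt
  by_cases hb : base = 1
  · simp [hb]
  · simp only [hb, if_neg, not_false_iff]
    have hmain := chksubGo_eq_resB base (PySem.Int.toChars num) (PySem.Int.toChars num) 0 (by simp)
    rw [show ((0 : Nat) : Int) = 0 from rfl] at hmain
    rw [hmain]
    unfold resB
    cases hm : (PySem.Int.toChars num).mapM (fun c => PySem.Int.ofChars? [c]) with
    | none => rfl
    | some ds =>
      cases ds with
      | nil =>
        exfalso
        apply toChars_ne_nil num
        cases hcs : PySem.Int.toChars num with
        | nil => rfl
        | cons c cs =>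
          exfalso
          rw [hcs, List.mapM_cons] at hm
          cases hf : PySem.Int.ofChars? [c] <;> simp [hf] at hm
          cases hr : cs.mapM (fun c => PySem.Int.ofChars? [c]) <;> simp [hr] at hm
      | cons d ds' =>
        by_cases hge : ds'.foldl max d ≥ base
        · have : (d :: ds').any (fun x => decide (base ≤ x)) = true := by
            rcases (foldl_max_ge_iff base ds' d).mp hge with h | ⟨x, hx, hbx⟩
            · simp [List.any_cons, h]
            · simp only [List.any_cons, Bool.or_eq_true, List.any_eq_true]
              exact Or.inr ⟨x, hx, by simpa using hbx⟩
          simp [this, hge]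
        · have : (d :: ds').any (fun x => decide (base ≤ x)) = false := by
            by_contra h
            apply hge
            apply (foldl_max_ge_iff base ds' d).mpr
            rcases List.any_eq_true.mp (Bool.not_eq_false _ |>.mp h) with ⟨x, hx, hbx⟩
            rcases List.mem_cons.mp hx with rfl | hx'
            · exact Or.inl (by simpa using hbx)
            · exact Or.inr ⟨x, hx', by simpa using hbx⟩
          simp [this, hge]
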